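-- pv_equiv track=rewrite | github.com/QuadraticFormula/OrganicChemicalNamer | NamerLogic.py | HalogenReupdate
-- ===== SOURCE A (Python) =====
-- def HalogenReupdate(HalogenListTemp, HalogenIndexTemp):
--     HalogenIndex = [[], [], [], []]
--     Bromo = []
--     Chloro = []
--     Fluoro = []
--     Iodo = []
--     for Halogen in range(len(HalogenListTemp)):
--         if HalogenListTemp[Halogen] == 4:
--             Fluoro.append(HalogenIndexTemp[Halogen] + 1)
--         elif HalogenListTemp[Halogen] == 5:
--             Chloro.append(HalogenIndexTemp[Halogen] + 1)
--         elif HalogenListTemp[Halogen] == 6: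
--             Bromo.append(HalogenIndexTemp[Halogen] + 1)
--         elif HalogenListTemp[Halogen] == 7:
--             Iodo.append(HalogenIndexTemp[Halogen] + 1)
--     Chloro.sort()
--     Fluoro.sort()
--     Bromo.sort()
--     Iodo.sort()
--
--     # Halogens have been reorganised in alphabetical order
--     HalogenIndex[0] = Bromo
--     HalogenIndex[1] = Chloro
--     HalogenIndex[2] = Fluoro
--     HalogenIndex[3] = Iodo
--     return HalogenIndex
-- ===== SOURCE B (Python) =====
-- def HalogenReupdate(HalogenListTemp, HalogenIndexTemp):
--     rank = {6: 0, 5: 1, 4: 2, 7: 3}  # alphabetical: Bromo, Chloro, Fluoro, Iodo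
--     pairs = [(rank[t], i + 1) for t, i in zip(HalogenListTemp, HalogenIndexTemp) if t in rank]
--     pairs.sort(key=lambda p: p[1])   # one stable sort by value; each bucket comes out ascending
--     result = [[], [], [], []]
--     for r, v in pairs:
--         result[r].append(v)
--     return result
-- ===== Notes on version B (the rewrite author's own statement) =====
-- stated objective: alternative
-- what changed: One pass builds (alphabetical-rank, index+1) pairs, a single stable sort by value replaces the four per-bucket sorts, and one distribution pass fills the four buckets.
import Mathlib
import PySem

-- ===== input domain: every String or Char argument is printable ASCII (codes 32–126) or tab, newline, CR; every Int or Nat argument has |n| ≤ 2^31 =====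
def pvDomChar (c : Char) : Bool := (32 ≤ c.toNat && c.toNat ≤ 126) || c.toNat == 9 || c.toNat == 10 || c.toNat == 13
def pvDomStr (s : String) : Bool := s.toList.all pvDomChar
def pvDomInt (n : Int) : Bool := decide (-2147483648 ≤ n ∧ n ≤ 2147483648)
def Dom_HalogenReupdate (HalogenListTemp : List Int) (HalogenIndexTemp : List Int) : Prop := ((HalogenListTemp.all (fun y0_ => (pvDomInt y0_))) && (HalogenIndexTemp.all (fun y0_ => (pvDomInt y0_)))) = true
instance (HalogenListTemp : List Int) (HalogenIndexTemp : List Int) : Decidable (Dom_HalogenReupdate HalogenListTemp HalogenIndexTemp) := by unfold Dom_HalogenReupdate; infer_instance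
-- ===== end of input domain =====

-- B replaces A's four per-type bucket sorts by one pair build, one stable sort by value and one
-- distribution pass; agreement on the return value is proved on Pre_ (where A raises no IndexError).

-- ===== PORT A =====
-- loop body of A's 'for Halogen in range(len(HalogenListTemp))' (state = (Bromo, Chloro, Fluoro, Iodo))
def stepA (L Idx : List Int) (st : List Int × List Int × List Int × List Int) (h : Int) :
    List Int × List Int × List Int × List Int :=
  if PySem.List.pyGetD L h 0 = 4 then (st.1, st.2.1, st.2.2.1 ++ [PySem.List.pyGetD Idx h 0 + 1], st.2.2.2)
  else if PySem.List.pyGetD L h 0 = 5 then (st.1, st.2.1 ++ [PySem.List.pyGetD Idx h 0 + 1], st.2.2.1, st.2.2.2)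
  else if PySem.List.pyGetD L h 0 = 6 then (st.1 ++ [PySem.List.pyGetD Idx h 0 + 1], st.2.1, st.2.2.1, st.2.2.2)
  else if PySem.List.pyGetD L h 0 = 7 then (st.1, st.2.1, st.2.2.1, st.2.2.2 ++ [PySem.List.pyGetD Idx h 0 + 1])
  else st

def HalogenReupdate (HalogenListTemp : List Int) (HalogenIndexTemp : List Int) : List (List Int) :=
  let st := (PySem.List.pyRange 0 (HalogenListTemp.length : Int) 1).foldl
    (stepA HalogenListTemp HalogenIndexTemp) ([], [], [], [])
  [PySem.List.sorted st.1 (fun x => x) false,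
   PySem.List.sorted st.2.1 (fun x => x) false,
   PySem.List.sorted st.2.2.1 (fun x => x) false,
   PySem.List.sorted st.2.2.2 (fun x => x) false]

-- ===== PORT B =====
def rankDict : PySem.Dict Int Int := PySem.Dict.ofList [(6, 0), (5, 1), (4, 2), (7, 3)]

-- the comprehension's per-element step: rank lookup ('t in rank' + 'rank[t]') building (rank, index+1)
def rnkFun (p : Int × Int) : Option (Int × Int) :=
  match PySem.Dict.get? rankDict p.1 with
  | some r => some (r, p.2 + 1)
  | none => none

-- loop body of B's 'for r, v in pairs: result[r].append(v)'
def stepB (res : List (List Int)) (q : Int × Int) : List (List Int) :=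
  res.set q.1.toNat (res.getD q.1.toNat [] ++ [q.2])

def HalogenReupdate_alt (HalogenListTemp : List Int) (HalogenIndexTemp : List Int) : List (List Int) :=
  let pairs := (HalogenListTemp.zip HalogenIndexTemp).filterMap rnkFun
  let sortedPairs := PySem.List.sorted pairs (fun q => q.2) false
  sortedPairs.foldl stepB [[], [], [], []]

-- ===== PRECONDITION & SPEC =====
-- Pre_ excludes exactly the inputs on which A raises IndexError: a halogen code (4..7) at a
-- position i with i ≥ HalogenIndexTemp.length.
def Pre_HalogenReupdate (HalogenListTemp : List Int) (HalogenIndexTemp : List Int) : Prop :=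
  ∀ i : Nat, i < HalogenListTemp.length →
    (HalogenListTemp.getD i 0 = 4 ∨ HalogenListTemp.getD i 0 = 5 ∨
     HalogenListTemp.getD i 0 = 6 ∨ HalogenListTemp.getD i 0 = 7) →
    i < HalogenIndexTemp.length

instance (HalogenListTemp : List Int) (HalogenIndexTemp : List Int) : Decidable (Pre_HalogenReupdate HalogenListTemp HalogenIndexTemp) := by unfold Pre_HalogenReupdate; infer_instance

def pvWitness_HalogenReupdate : List Int × List Int := ([4, 6, 2, 5, 7], [3, 0, 9, 1, 1])

def Spec_HalogenReupdate (HalogenListTemp : List Int) (HalogenIndexTemp : List Int) (out : List (List Int)) : Prop := out = HalogenReupdate_alt HalogenListTemp HalogenIndexTemp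
instance (HalogenListTemp : List Int) (HalogenIndexTemp : List Int) (out : List (List Int)) : Decidable (Spec_HalogenReupdate HalogenListTemp HalogenIndexTemp out) := by unfold Spec_HalogenReupdate; infer_instance

-- ===== CLAIM (what is proved, stated in full; the proofs are below) =====
def Claim_equal_HalogenReupdate : Prop := ∀ (HalogenListTemp : List Int) (HalogenIndexTemp : List Int), Dom_HalogenReupdate HalogenListTemp HalogenIndexTemp → Pre_HalogenReupdate HalogenListTemp HalogenIndexTemp → Spec_HalogenReupdate HalogenListTemp HalogenIndexTemp (HalogenReupdate HalogenListTemp HalogenIndexTemp)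

-- ===== LEMMAS AND PROOFS =====

-- the values (index+1) collected for halogen type t, in zip order
def collT (t : Int) (ps : List (Int × Int)) : List Int :=
  (ps.filter (fun p => decide (p.1 = t))).map (fun p => p.2 + 1)

-- zip-structured form of A's loop body
def stepZ (st : List Int × List Int × List Int × List Int) (p : Int × Int) :
    List Int × List Int × List Int × List Int :=
  if p.1 = 4 then (st.1, st.2.1, st.2.2.1 ++ [p.2 + 1], st.2.2.2)
  else if p.1 = 5 then (st.1, st.2.1 ++ [p.2 + 1], st.2.2.1, st.2.2.2)
  else if p.1 = 6 then (st.1 ++ [p.2 + 1], st.2.1, st.2.2.1, st.2.2.2)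
  else if p.1 = 7 then (st.1, st.2.1, st.2.2.1, st.2.2.2 ++ [p.2 + 1])
  else st

theorem loopA_eq_zip (L Idx : List Int) (hpre : Pre_HalogenReupdate L Idx) :
    ∀ (n k : Nat), L.length - k ≤ n → ∀ acc,
      (PySem.List.pyRange (k : Int) (L.length : Int) 1).foldl (stepA L Idx) acc
        = ((L.drop k).zip (Idx.drop k)).foldl stepZ acc := by
  intro n
  induction n with
  | zero =>
    intro k hk acc
    have hL : L.length ≤ k := by omega
    rw [PySem.List.pyRange_one_eq_nil (by exact_mod_cast hL), List.drop_eq_nil_of_le hL]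
    simp
  | succ n ih =>
    intro k hk acc
    by_cases hkL : k < L.length
    · have hgetL : PySem.List.pyGetD L (k : Int) 0 = L[k] := by
        rw [PySem.List.pyGetD_natCast, List.getD_eq_getElem _ _ hkL]
      have hcons : ((k : Int) : Int) + 1 = ((k + 1 : Nat) : Int) := by push_cast; ring
      rw [PySem.List.pyRange_one_cons (by exact_mod_cast hkL), List.foldl_cons, hcons,
        ih (k + 1) (by omega)]
      by_cases hhal : L[k] = 4 ∨ L[k] = 5 ∨ L[k] = 6 ∨ L[k] = 7
      · have hkI : k < Idx.length := by
          refine hpre k hkL ?_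
          rwa [List.getD_eq_getElem _ _ hkL]
        have hgetI : PySem.List.pyGetD Idx (k : Int) 0 = Idx[k] := by
          rw [PySem.List.pyGetD_natCast, List.getD_eq_getElem _ _ hkI]
        have hstep : stepA L Idx acc (k : Int) = stepZ acc (L[k], Idx[k]) := by
          simp [stepA, stepZ, hgetL, hgetI]
        rw [List.drop_eq_getElem_cons hkL, List.drop_eq_getElem_cons hkI,
          List.zip_cons_cons, List.foldl_cons, hstep]
      · push Not at hhal
        obtain ⟨h4, h5, h6, h7⟩ := hhal
        have hstep : stepA L Idx acc (k : Int) = acc := by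
          simp [stepA, hgetL, h4, h5, h6, h7]
        rw [hstep]
        by_cases hkI : k < Idx.length
        · have hz : stepZ acc (L[k], Idx[k]) = acc := by simp [stepZ, h4, h5, h6, h7]
          rw [List.drop_eq_getElem_cons hkL, List.drop_eq_getElem_cons hkI,
            List.zip_cons_cons, List.foldl_cons, hz]
        · rw [List.drop_eq_nil_of_le (α := Int) (by omega : Idx.length ≤ k),
            List.drop_eq_nil_of_le (α := Int) (by omega : Idx.length ≤ k + 1)]
          simp
    · have hL : L.length ≤ k := by omega
      rw [PySem.List.pyRange_one_eq_nil (by exact_mod_cast hL), List.drop_eq_nil_of_le hL]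
      simp

theorem foldZ_buckets (ps : List (Int × Int)) :
    ∀ B C F I, ps.foldl stepZ (B, C, F, I)
      = (B ++ collT 6 ps, C ++ collT 5 ps, F ++ collT 4 ps, I ++ collT 7 ps) := by
  induction ps with
  | nil => intro B C F I; simp [collT]
  | cons p tl ih =>
    intro B C F I
    by_cases h4 : p.1 = 4 <;> by_cases h5 : p.1 = 5 <;> by_cases h6 : p.1 = 6 <;> by_cases h7 : p.1 = 7 <;>
      simp [stepZ, collT, h4, h5, h6, h7, List.foldl_cons, ih]

-- B's generator, filtered to one rank, is exactly the (rank, value) image of one halogen type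
theorem filterMap_rank (ps : List (Int × Int)) (t r : Int)
    (ht : PySem.Dict.get? rankDict t = some r)
    (hinj : ∀ t', PySem.Dict.get? rankDict t' = some r → t' = t) :
    (ps.filterMap rnkFun).filter (fun q => decide (q.1 = r))
      = (ps.filter (fun p => decide (p.1 = t))).map (fun p => (r, p.2 + 1)) := by
  induction ps with
  | nil => simp
  | cons p tl ih =>
    rcases hg : PySem.Dict.get? rankDict p.1 with _ | r'
    · have hpt : p.1 ≠ t := fun h => by rw [h, ht] at hg; simp at hg
      have hstep : rnkFun p = none := by simp [rnkFun, hg]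
      rw [List.filterMap_cons, hstep, List.filter_cons_of_neg (by simp [hpt]), ih]
    · have hstep : rnkFun p = some (r', p.2 + 1) := by simp [rnkFun, hg]
      by_cases hr : r' = r
      · have hpt : p.1 = t := hinj p.1 (by rw [hg, hr])
        rw [List.filterMap_cons, hstep, List.filter_cons_of_pos (by simp [hr]),
          List.filter_cons_of_pos (by simp [hpt]), List.map_cons, ih, hr]
      · have hpt : p.1 ≠ t := fun h => by rw [h, ht] at hg; exact hr (Option.some.inj hg.symm)
        rw [List.filterMap_cons, hstep, List.filter_cons_of_neg (by simp [hr]),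
          List.filter_cons_of_neg (by simp [hpt]), ih]

theorem foldB_buckets (qs : List (Int × Int))
    (hm : ∀ q ∈ qs, q.1 = 0 ∨ q.1 = 1 ∨ q.1 = 2 ∨ q.1 = 3) :
    ∀ b0 b1 b2 b3, qs.foldl stepB [b0, b1, b2, b3]
      = [b0 ++ (qs.filter (fun q => decide (q.1 = 0))).map (fun q => q.2),
         b1 ++ (qs.filter (fun q => decide (q.1 = 1))).map (fun q => q.2),
         b2 ++ (qs.filter (fun q => decide (q.1 = 2))).map (fun q => q.2),
         b3 ++ (qs.filter (fun q => decide (q.1 = 3))).map (fun q => q.2)] := by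
  induction qs with
  | nil => intro b0 b1 b2 b3; simp
  | cons q tl ih =>
    intro b0 b1 b2 b3
    have hq := hm q (List.mem_cons_self ..)
    have ihtl := ih (fun p hp => hm p (List.mem_cons_of_mem _ hp))
    rcases hq with h | h | h | h <;>
      simp [List.foldl_cons, stepB, h, ihtl]

-- one bucket of B equals the sorted bucket of A
theorem bucket_eq (Z : List (Int × Int)) (t r : Int)
    (ht : PySem.Dict.get? rankDict t = some r)
    (hinj : ∀ t', PySem.Dict.get? rankDict t' = some r → t' = t) :
    ((PySem.List.sorted (Z.filterMap rnkFun) (fun q => q.2) false).filter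
        (fun q => decide (q.1 = r))).map (fun q => q.2)
      = PySem.List.sorted (collT t Z) (fun x => x) false := by
  have hcoll : ((Z.filterMap rnkFun).filter (fun q => decide (q.1 = r))).map (fun q => q.2)
      = collT t Z := by
    rw [filterMap_rank Z t r ht hinj, List.map_map]
    simp [collT]
  have hperm : (((PySem.List.sorted (Z.filterMap rnkFun) (fun q => q.2) false).filter
      (fun q => decide (q.1 = r))).map (fun q => q.2)).Perm (collT t Z) := by
    rw [← hcoll]
    exact (((PySem.List.sorted_perm (Z.filterMap rnkFun) (fun q => q.2) false).filter _).map _)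
  have hpair : (((PySem.List.sorted (Z.filterMap rnkFun) (fun q => q.2) false).filter
      (fun q => decide (q.1 = r))).map (fun q => q.2)).Pairwise (· ≤ ·) := by
    rw [List.pairwise_map]
    exact (PySem.List.sorted_pairwise (Z.filterMap rnkFun) (fun q => q.2)).filter _
  exact (PySem.List.sorted_id_eq_of_perm_of_pairwise _ _ hperm hpair).symm

theorem rank_char (t : Int) : PySem.Dict.get? rankDict t
    = if t = 6 then some (0 : Int) else if t = 5 then some 1 else if t = 4 then some 2
      else if t = 7 then some 3 else none := by
  have h : rankDict = PySem.Dict.mk [(6, 0), (5, 1), (4, 2), (7, 3)] := by decide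
  rw [h]
  simp only [PySem.Dict.get?_mk_cons]
  split_ifs <;> simp_all [PySem.Dict.get?]

theorem rank_inj (t r t' : Int) (ht : PySem.Dict.get? rankDict t = some r)
    (h : PySem.Dict.get? rankDict t' = some r) : t' = t := by
  have h1 := rank_char t
  have h2 := rank_char t'
  rw [ht] at h1
  rw [h] at h2
  split_ifs at h1 h2 <;> simp_all

-- ===== VERDICT (by name: the statement is the Claim_ definition above) =====
theorem HalogenReupdate_spec : Claim_equal_HalogenReupdate := by
  intro L Idx _ hpre
  unfold Spec_HalogenReupdate HalogenReupdate HalogenReupdate_alt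
  have hA := loopA_eq_zip L Idx hpre L.length 0 (by omega) ([], [], [], [])
  simp only [Nat.cast_zero, List.drop_zero] at hA
  rw [hA, foldZ_buckets]
  have hm : ∀ q ∈ PySem.List.sorted ((L.zip Idx).filterMap rnkFun) (fun q => q.2) false,
      q.1 = 0 ∨ q.1 = 1 ∨ q.1 = 2 ∨ q.1 = 3 := by
    intro q hq
    rw [PySem.List.mem_sorted] at hq
    obtain ⟨p, _, he⟩ := List.mem_filterMap.mp hq
    revert he
    unfold rnkFun
    rcases hg : PySem.Dict.get? rankDict p.1 with _ | r
    · intro he; cases he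
    · intro he
      cases he
      have hc := rank_char p.1
      rw [hg] at hc
      split_ifs at hc <;> simp_all
  rw [foldB_buckets _ hm]
  simp only [List.nil_append]
  rw [bucket_eq (L.zip Idx) 6 0 (by decide) (fun t' h => rank_inj 6 0 t' (by decide) h),
    bucket_eq (L.zip Idx) 5 1 (by decide) (fun t' h => rank_inj 5 1 t' (by decide) h),
    bucket_eq (L.zip Idx) 4 2 (by decide) (fun t' h => rank_inj 4 2 t' (by decide) h),
    bucket_eq (L.zip Idx) 7 3 (by decide) (fun t' h => rank_inj 7 3 t' (by decide) h)]
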